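-- pv_equiv track=rewrite | github.com/ammarfitwalla/Dewa | pdfs/Projects/LV/Shape_extraction_Output/Output_CSV/consolidated/by_sym_db.py | segregate_whl_dta
-- ===== SOURCE A (Python) =====
-- def segregate_whl_dta(data):
--     vi, txt, pllin = True, False, False
--     vil, txtl, pllinl = [], [], []
--
--     for d in data:
--         if vi:
--             if d[1] == "Shape":
--                 vi = False
--                 txt = True
--                 continue
--             vil.append([d[1], d[2], d[3], d[4], d[5]])
--
--         elif txt:
--             if d[0] == "Polyline":
--                 txt = False
--                 pllin = True
--                 continue
--             txtl.append([d[3], d[4], d[5], d[6], d[7]])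
--
--         elif pllin:
--             pllinl.append([d[0], d[1], d[2]])
--     return vil, txtl, pllinl
-- ===== SOURCE B (Python) =====
-- def segregate_whl_dta(data):
--     n = len(data)
--     i = next((k for k in range(n) if data[k][1] == "Shape"), n)
--     j = next((k for k in range(i + 1, n) if data[k][0] == "Polyline"), n)
--     vil = [[d[1], d[2], d[3], d[4], d[5]] for d in data[:i]]
--     txtl = [[d[3], d[4], d[5], d[6], d[7]] for d in data[i + 1:j]]
--     pllinl = [[d[0], d[1], d[2]] for d in data[j + 1:]]
--     return vil, txtl, pllinl
-- ===== Notes on version B (the rewrite author's own statement) =====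
-- stated objective: simpler
-- what changed: Replaces the boolean state machine accumulating three lists in one interleaved loop by locating the two sentinel indices first and then building each output as a slice-and-project of its segment.
import Mathlib
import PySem

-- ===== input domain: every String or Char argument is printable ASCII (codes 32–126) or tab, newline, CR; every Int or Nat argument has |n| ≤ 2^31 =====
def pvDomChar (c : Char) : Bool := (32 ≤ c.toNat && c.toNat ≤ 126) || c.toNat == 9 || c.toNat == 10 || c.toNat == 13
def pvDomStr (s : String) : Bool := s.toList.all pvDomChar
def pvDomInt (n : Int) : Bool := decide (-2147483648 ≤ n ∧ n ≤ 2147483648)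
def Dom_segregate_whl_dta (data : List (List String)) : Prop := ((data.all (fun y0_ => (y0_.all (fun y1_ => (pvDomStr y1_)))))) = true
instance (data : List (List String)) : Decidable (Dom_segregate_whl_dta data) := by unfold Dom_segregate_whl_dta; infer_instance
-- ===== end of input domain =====

-- B replaces A's boolean state machine by first locating the two sentinel indices
-- and then slicing-and-projecting the three segments (objective: simpler).

-- shared row helpers (d[k] reads; Python raises on short rows — those inputs are outside Pre_)
def pvQ1 (d : List String) : Bool := PySem.List.pyGetD d 1 "" == "Shape"
def pvQ0 (d : List String) : Bool := PySem.List.pyGetD d 0 "" == "Polyline"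
def pvP15 (d : List String) : List String :=
  [PySem.List.pyGetD d 1 "", PySem.List.pyGetD d 2 "", PySem.List.pyGetD d 3 "",
   PySem.List.pyGetD d 4 "", PySem.List.pyGetD d 5 ""]
def pvP37 (d : List String) : List String :=
  [PySem.List.pyGetD d 3 "", PySem.List.pyGetD d 4 "", PySem.List.pyGetD d 5 "",
   PySem.List.pyGetD d 6 "", PySem.List.pyGetD d 7 ""]
def pvP02 (d : List String) : List String :=
  [PySem.List.pyGetD d 0 "", PySem.List.pyGetD d 1 "", PySem.List.pyGetD d 2 ""]

-- ===== PORT A =====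
-- loop body of A: state (vi, txt, pllin, vil, txtl, pllinl)
def pvStepA (st : Bool × Bool × Bool × List (List String) × List (List String) × List (List String))
    (d : List String) : Bool × Bool × Bool × List (List String) × List (List String) × List (List String) :=
  let (vi, txt, pllin, vil, txtl, pllinl) := st
  if vi then
    if pvQ1 d then (false, true, pllin, vil, txtl, pllinl)
    else (vi, txt, pllin, vil ++ [pvP15 d], txtl, pllinl)
  else if txt then
    if pvQ0 d then (vi, false, true, vil, txtl, pllinl)
    else (vi, txt, pllin, vil, txtl ++ [pvP37 d], pllinl)
  else if pllin then (vi, txt, pllin, vil, txtl, pllinl ++ [pvP02 d])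
  else (vi, txt, pllin, vil, txtl, pllinl)

def segregate_whl_dta (data : List (List String)) : List (List String) × List (List String) × List (List String) :=
  let r := data.foldl pvStepA (true, false, false, [], [], [])
  (r.2.2.2.1, r.2.2.2.2.1, r.2.2.2.2.2)

-- ===== PORT B =====
def segregate_whl_dta_alt (data : List (List String)) : List (List String) × List (List String) × List (List String) :=
  let n := data.length
  let i := data.findIdx pvQ1                                -- first row with d[1] == "Shape" (n if none)
  let j := min (i + 1 + (data.drop (i + 1)).findIdx pvQ0) n -- first later row with d[0] == "Polyline" (n if none)
  ((data.take i).map pvP15,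
   ((data.drop (i + 1)).take (j - (i + 1))).map pvP37,
   (data.drop (j + 1)).map pvP02)

-- ===== PRECONDITION & SPEC =====
-- Pre_ excludes exactly the inputs on which Python A raises IndexError: a row too short
-- for the reads its segment performs (len ≥ 6 before the "Shape" sentinel, len ≥ 8
-- between the sentinels, len ≥ 3 after the "Polyline" sentinel).
def Pre_segregate_whl_dta (data : List (List String)) : Prop :=
  let i := data.findIdx pvQ1
  let rest := data.drop (i + 1)
  let jr := rest.findIdx pvQ0
  (∀ d ∈ data.take i, 6 ≤ d.length) ∧ (∀ d ∈ rest.take jr, 8 ≤ d.length) ∧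
    (∀ d ∈ rest.drop (jr + 1), 3 ≤ d.length)
instance (data : List (List String)) : Decidable (Pre_segregate_whl_dta data) := by
  unfold Pre_segregate_whl_dta; infer_instance
def pvWitness_segregate_whl_dta : List (List String) := [["a", "Shape"], ["Polyline"]]

def Spec_segregate_whl_dta (data : List (List String)) (out : List (List String) × List (List String) × List (List String)) : Prop := out = segregate_whl_dta_alt data
instance (data : List (List String)) (out : List (List String) × List (List String) × List (List String)) : Decidable (Spec_segregate_whl_dta data out) := by unfold Spec_segregate_whl_dta; infer_instance

-- ===== CLAIM (what is proved, stated in full; the proofs are below) =====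
def Claim_equal_segregate_whl_dta : Prop := ∀ (data : List (List String)), Dom_segregate_whl_dta data → Pre_segregate_whl_dta data → Spec_segregate_whl_dta data (segregate_whl_dta data)

-- ===== LEMMAS AND PROOFS =====

def pvOut (st : Bool × Bool × Bool × List (List String) × List (List String) × List (List String)) :
    List (List String) × List (List String) × List (List String) :=
  (st.2.2.2.1, st.2.2.2.2.1, st.2.2.2.2.2)

-- phase 3 (pllin): every remaining row is projected and appended
theorem pvLoop2 (rest : List (List String)) (vil txtl pll : List (List String)) :
    rest.foldl pvStepA (false, false, true, vil, txtl, pll)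
      = (false, false, true, vil, txtl, pll ++ rest.map pvP02) := by
  induction rest generalizing pll with
  | nil => simp
  | cons d t ih => simp [pvStepA, ih]

-- phase 2 (txt): rows before the "Polyline" sentinel are projected, the rest goes to phase 3
theorem pvLoop1 (rest : List (List String)) (vil txtl pll : List (List String)) :
    pvOut (rest.foldl pvStepA (false, true, false, vil, txtl, pll))
      = (vil, txtl ++ (rest.take (rest.findIdx pvQ0)).map pvP37,
         pll ++ (rest.drop (rest.findIdx pvQ0 + 1)).map pvP02) := by
  induction rest generalizing txtl with
  | nil => simp [pvOut]
  | cons d t ih =>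
    by_cases h : pvQ0 d
    · simp [pvStepA, h, pvLoop2, pvOut, List.findIdx_cons]
    · simp [pvStepA, h, ih, List.findIdx_cons]

-- phase 1 (vi): rows before the "Shape" sentinel are projected, the rest goes to phase 2
theorem pvLoop0 (data : List (List String)) (vil txtl pll : List (List String)) :
    pvOut (data.foldl pvStepA (true, false, false, vil, txtl, pll))
      = (vil ++ (data.take (data.findIdx pvQ1)).map pvP15,
         txtl ++ (((data.drop (data.findIdx pvQ1 + 1)).take
             ((data.drop (data.findIdx pvQ1 + 1)).findIdx pvQ0)).map pvP37),
         pll ++ ((data.drop (data.findIdx pvQ1 + 1)).drop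
             ((data.drop (data.findIdx pvQ1 + 1)).findIdx pvQ0 + 1)).map pvP02) := by
  induction data generalizing vil with
  | nil => simp [pvOut]
  | cons d t ih =>
    by_cases h : pvQ1 d
    · simp [pvStepA, h, pvLoop1, List.findIdx_cons]
    · simp [pvStepA, h, ih, List.findIdx_cons]

-- ===== VERDICT (by name: the statement is the Claim_ definition above) =====
theorem segregate_whl_dta_spec : Claim_equal_segregate_whl_dta := by
  intro data _ _
  show segregate_whl_dta data = segregate_whl_dta_alt data
  have hA : segregate_whl_dta data
      = pvOut (data.foldl pvStepA (true, false, false, [], [], [])) := rfl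
  rw [hA, pvLoop0]
  set i := data.findIdx pvQ1 with hi
  set jr := (data.drop (i + 1)).findIdx pvQ0 with hjr
  have hin : i ≤ data.length := List.findIdx_le_length
  have hjn : jr ≤ (data.drop (i + 1)).length := List.findIdx_le_length
  have hB : segregate_whl_dta_alt data
      = ((data.take i).map pvP15,
         ((data.drop (i + 1)).take (min (i + 1 + jr) data.length - (i + 1))).map pvP37,
         (data.drop (min (i + 1 + jr) data.length + 1)).map pvP02) := rfl
  rw [hB]
  by_cases hc : i + 1 + jr ≤ data.length
  · have hj : min (i + 1 + jr) data.length = i + 1 + jr := by omega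
    simp only [hj]
    have h1 : i + 1 + jr - (i + 1) = jr := by omega
    have h2 : data.drop (i + 1 + jr + 1) = (data.drop (i + 1)).drop (jr + 1) := by
      rw [List.drop_drop]; ring_nf
    rw [h1, h2]; simp
  · -- then i = data.length: no "Shape" sentinel, everything after it is empty
    have hil : i = data.length := by
      simp only [List.length_drop] at hjn; omega
    have hd : data.drop (i + 1) = [] := List.drop_eq_nil_of_le (by omega)
    have hjr0 : jr = 0 := by rw [hjr, hd]; simp
    have hj : min (i + 1 + jr) data.length = data.length := by omega
    simp [hd, hjr0]
    omega
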